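-- pv_equiv track=rewrite | github.com/Hptd/node-python | ui/dialogs/regex_generator_dialog.py | _find_common_suffix_pattern
-- ===== SOURCE A (Python) =====
-- def _find_common_suffix_pattern(sample_lines):
--     """查找所有示例的共同后缀模式"""
--     if len(sample_lines) < 2:
--         return None
--
--     # 从后向前查找共同模式
--     common_parts = []
--     min_len = min(len(line) for line in sample_lines)
--
--     for i in range(1, min_len + 1):
--         chars = [line[-i] for line in sample_lines]
--         if len(set(chars)) == 1:
--             common_parts.append(chars[0])
--         else:
--             break
--
--     if len(common_parts) > 0:
--         return ''.join(reversed(common_parts))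
--     return None
-- ===== SOURCE B (Python) =====
-- def _find_common_suffix_pattern(sample_lines):
--     if len(sample_lines) < 2:
--         return None
--     def lcp2(a, b):
--         out = []
--         for x, y in zip(a, b):
--             if x == y:
--                 out.append(x)
--             else:
--                 break
--         return out
--     cand = list(reversed(sample_lines[0]))
--     for line in sample_lines[1:]:
--         cand = lcp2(cand, list(reversed(line)))
--     return ''.join(reversed(cand)) if cand else None
-- ===== Notes on version B (the rewrite author's own statement) =====
-- stated objective: alternative
-- what changed: A scans character positions from the end checking all lines at once per position (building a set of the i-th-from-last chars of every line); B folds pairwise: it takes the first line reversed and repeatedly trims it to the common prefix with each remaining reversed line.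
import Mathlib
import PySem

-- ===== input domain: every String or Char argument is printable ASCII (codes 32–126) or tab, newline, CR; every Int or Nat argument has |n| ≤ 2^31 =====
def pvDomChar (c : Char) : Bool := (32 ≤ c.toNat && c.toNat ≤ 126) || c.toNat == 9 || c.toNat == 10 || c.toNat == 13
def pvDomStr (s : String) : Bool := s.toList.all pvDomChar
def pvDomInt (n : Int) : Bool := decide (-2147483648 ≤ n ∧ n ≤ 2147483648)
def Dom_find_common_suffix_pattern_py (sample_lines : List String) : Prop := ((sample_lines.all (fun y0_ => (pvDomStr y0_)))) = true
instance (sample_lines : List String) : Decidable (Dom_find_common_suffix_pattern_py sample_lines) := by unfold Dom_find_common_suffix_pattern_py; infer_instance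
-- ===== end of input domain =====

-- B replaces A's per-position all-lines scan (set of i-th-from-last chars of every line) by a
-- pairwise fold that trims a candidate (first line reversed) to its common prefix with each
-- remaining reversed line; same cost, different decomposition (objective: alternative).

-- ===== PORT A =====
-- line[-i]: exact for 1 ≤ i ≤ len(line) (the only way A's loop uses it, since i ≤ min_len)
def pyCharNeg (s : String) (i : Nat) : Char := s.toList.reverse.getD (i - 1) ' '

-- the 'for i in range(1, min_len+1): … else: break' loop, with accumulator common_parts
def loopA (lines : List String) (min_len : Nat) (i : Nat) (acc : List Char) : List Char :=
  if i ≤ min_len then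
    let chars := lines.map (fun line => pyCharNeg line i)
    if (PySem.Set.ofList chars).length = 1 then
      loopA lines min_len (i + 1) (acc ++ [chars.headD ' '])
    else acc
  else acc
termination_by min_len + 1 - i

def find_common_suffix_pattern_py (sample_lines : List String) : Option String :=
  if sample_lines.length < 2 then none
  else
    let min_len := ((sample_lines.map (fun line => line.toList.length)).min?).getD 0
    let common_parts := loopA sample_lines min_len 1 []
    if common_parts.length > 0 then some (String.ofList common_parts.reverse) else none

-- ===== PORT B =====
-- Source B's lcp2: zip the two lists, keep while equal, break at first mismatch
def lcp2 : List Char → List Char → List Char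
  | x :: xs, y :: ys => if x = y then x :: lcp2 xs ys else []
  | _, _ => []

def find_common_suffix_pattern_py_alt (sample_lines : List String) : Option String :=
  match sample_lines with
  | [] => none
  | [_] => none
  | l :: ls =>
    let cand := ls.foldl (fun c line => lcp2 c line.toList.reverse) l.toList.reverse
    if cand.isEmpty then none else some (String.ofList cand.reverse)

-- ===== PRECONDITION & SPEC =====
def Spec_find_common_suffix_pattern_py (sample_lines : List String) (out : Option String) : Prop := out = find_common_suffix_pattern_py_alt sample_lines
instance (sample_lines : List String) (out : Option String) : Decidable (Spec_find_common_suffix_pattern_py sample_lines out) := by unfold Spec_find_common_suffix_pattern_py; infer_instance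

-- ===== CLAIM (what is proved, stated in full; the proofs are below) =====
def Claim_equal_find_common_suffix_pattern_py : Prop := ∀ (sample_lines : List String), Dom_find_common_suffix_pattern_py sample_lines → Spec_find_common_suffix_pattern_py sample_lines (find_common_suffix_pattern_py sample_lines)

-- ===== LEMMAS AND PROOFS =====

-- p is THE longest common prefix of the family fam
def IsLCP (p : List Char) (fam : List (List Char)) : Prop :=
  (∀ r ∈ fam, p <+: r) ∧ ∀ q, (∀ r ∈ fam, q <+: r) → q <+: p

theorem isLCP_unique {p q : List Char} {fam : List (List Char)}
    (hp : IsLCP p fam) (hq : IsLCP q fam) : p = q :=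
  (hp.2 q hq.1).sublist.antisymm ((hq.2 p hp.1).sublist) |>.symm ▸ rfl

theorem lcp2_prefix_left : ∀ a b : List Char, lcp2 a b <+: a := by
  intro a
  induction a with
  | nil => intro b; cases b <;> simp [lcp2]
  | cons x xs ih =>
    intro b
    cases b with
    | nil => simp [lcp2]
    | cons y ys =>
      simp only [lcp2]
      split
      · exact List.cons_prefix_cons.mpr ⟨rfl, ih ys⟩
      · exact List.nil_prefix

theorem lcp2_prefix_right : ∀ a b : List Char, lcp2 a b <+: b := by
  intro a
  induction a with
  | nil => intro b; cases b <;> simp [lcp2]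
  | cons x xs ih =>
    intro b
    cases b with
    | nil => simp [lcp2]
    | cons y ys =>
      simp only [lcp2]
      split
      · rename_i h; subst h; exact List.cons_prefix_cons.mpr ⟨rfl, ih ys⟩
      · exact List.nil_prefix

theorem prefix_lcp2 : ∀ q a b : List Char, q <+: a → q <+: b → q <+: lcp2 a b := by
  intro q
  induction q with
  | nil => intro a b _ _; exact List.nil_prefix
  | cons z zs ih =>
    intro a b ha hb
    obtain ⟨ta, rfl⟩ := ha
    obtain ⟨tb, hb'⟩ := hb
    cases b with
    | nil => simp at hb'
    | cons y ys =>
      simp only [List.cons_append, List.cons.injEq] at hb'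
      obtain ⟨rfl, h2⟩ := hb'
      simp only [lcp2, List.cons_append, if_true]
      exact List.cons_prefix_cons.mpr ⟨rfl, ih (zs ++ ta) ys ⟨ta, rfl⟩ ⟨tb, h2⟩⟩

theorem isLCP_foldl : ∀ (rs : List (List Char)) (c : List Char),
    IsLCP (rs.foldl lcp2 c) (c :: rs) := by
  intro rs
  induction rs with
  | nil =>
    intro c
    exact ⟨by simp, fun q hq => hq c (by simp)⟩
  | cons r rs ih =>
    intro c
    have IH := ih (lcp2 c r)
    constructor
    · intro t ht
      simp only [List.mem_cons] at ht
      have hhead : rs.foldl lcp2 (lcp2 c r) <+: lcp2 c r := IH.1 _ (by simp)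
      rcases ht with rfl | rfl | ht
      · exact hhead.trans (lcp2_prefix_left _ _)
      · exact hhead.trans (lcp2_prefix_right _ _)
      · exact IH.1 t (by simp [ht])
    · intro q hq
      apply IH.2
      intro t ht
      simp only [List.mem_cons] at ht
      rcases ht with rfl | ht
      · exact prefix_lcp2 q _ _ (hq c (by simp)) (hq r (by simp))
      · exact hq t (by simp [ht])

-- set(xs) has one element iff all elements of xs equal its head
theorem setlen1 (x : Char) (xs : List Char) :
    (PySem.Set.ofList (x :: xs)).length = 1 ↔ ∀ y ∈ xs, y = x := by
  constructor
  · intro h y hy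
    obtain ⟨a, ha⟩ := List.length_eq_one_iff.mp h
    have hx : x ∈ PySem.Set.ofList (x :: xs) := by
      rw [PySem.Set.mem_ofList]; simp
    have hym : y ∈ PySem.Set.ofList (x :: xs) := by
      rw [PySem.Set.mem_ofList]; simp [hy]
    rw [ha] at hx hym
    simp at hx hym
    rw [hym, hx]
  · intro h
    have : PySem.Set.ofList (x :: xs) = [x] := by
      have hnd := PySem.Set.nodup_ofList (x :: xs)
      have hmem : ∀ z, z ∈ PySem.Set.ofList (x :: xs) ↔ z = x := by
        intro z
        rw [PySem.Set.mem_ofList]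
        constructor
        · intro hz
          rcases List.mem_cons.mp hz with rfl | hz
          · rfl
          · exact h z hz
        · intro hz; simp [hz]
      cases hs : PySem.Set.ofList (x :: xs) with
      | nil =>
        exfalso
        have := (hmem x).mpr rfl
        rw [hs] at this; simp at this
      | cons a t =>
        have ha : a = x := (hmem a).mp (by rw [hs]; simp)
        have ht : t = [] := by
          cases t with
          | nil => rfl
          | cons b u =>
            exfalso
            have hb : b = x := (hmem b).mp (by rw [hs]; simp)
            rw [hs] at hnd
            simp [ha, hb] at hnd
        rw [ha, ht]
    rw [this]
    rfl

-- extend a strict prefix by the next element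
theorem prefix_snoc_getD {acc r : List Char} (h : acc <+: r) (hlt : acc.length < r.length) :
    acc ++ [r.getD acc.length ' '] <+: r := by
  obtain ⟨t, rfl⟩ := h
  cases t with
  | nil => simp at hlt
  | cons b u =>
    have : (acc ++ b :: u).getD acc.length ' ' = b := by
      simp [List.getD]
    rw [this]
    exact ⟨u, by simp⟩

-- pointwise value forced by a prefix
theorem prefix_getD_eq {q r : List Char} (h : q <+: r) (j : Nat) (hj : j < q.length) :
    r.getD j ' ' = q.getD j ' ' := by
  obtain ⟨t, rfl⟩ := h
  simp [List.getD, List.getElem?_append_left hj]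

-- step equations for loopA
theorem loopA_step_pos (lines : List String) (min_len i : Nat) (acc : List Char)
    (h : i ≤ min_len)
    (hset : (PySem.Set.ofList (lines.map (fun line => pyCharNeg line i))).length = 1) :
    loopA lines min_len i acc =
      loopA lines min_len (i + 1)
        (acc ++ [(lines.map (fun line => pyCharNeg line i)).headD ' ']) := by
  rw [loopA]; simp [h, hset]

theorem loopA_step_neg (lines : List String) (min_len i : Nat) (acc : List Char)
    (h : i ≤ min_len)
    (hset : ¬ (PySem.Set.ofList (lines.map (fun line => pyCharNeg line i))).length = 1) :
    loopA lines min_len i acc = acc := by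
  rw [loopA]; simp [h, hset]

theorem loopA_done (lines : List String) (min_len i : Nat) (acc : List Char)
    (h : ¬ i ≤ min_len) : loopA lines min_len i acc = acc := by
  rw [loopA]; simp [h]

-- the main invariant for A's loop
theorem loopA_isLCP (l : String) (ls : List String) (min_len : Nat)
    (hmin_le : ∀ r ∈ (l :: ls).map (fun s => s.toList.reverse), min_len ≤ r.length)
    (hmin_mem : ∃ r ∈ (l :: ls).map (fun s => s.toList.reverse), r.length = min_len) :
    ∀ (k i : Nat) (acc : List Char), min_len + 1 - i = k → acc.length + 1 = i →
      (∀ r ∈ (l :: ls).map (fun s => s.toList.reverse), acc <+: r) →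
      IsLCP (loopA (l :: ls) min_len i acc) ((l :: ls).map (fun s => s.toList.reverse)) := by
  intro k
  induction k with
  | zero =>
    intro i acc hk hi hpre
    have hgt : ¬ i ≤ min_len := by omega
    rw [loopA_done _ _ _ _ hgt]
    refine ⟨hpre, ?_⟩
    intro q hq
    obtain ⟨r0, hr0mem, hr0len⟩ := hmin_mem
    have hql : q.length ≤ min_len := by
      have := (hq r0 hr0mem).length_le
      omega
    rcases List.prefix_or_prefix_of_prefix (hq r0 hr0mem) (hpre r0 hr0mem) with h | h
    · exact h
    · have : acc = q := h.eq_of_length_le (by omega)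
      rw [← this]
  | succ k ihk =>
    intro i acc hk hi hpre
    by_cases hle : i ≤ min_len
    · by_cases hset :
        (PySem.Set.ofList ((l :: ls).map (fun line => pyCharNeg line i))).length = 1
      · rw [loopA_step_pos _ _ _ _ hle hset]
        have hall : ∀ y ∈ ls.map (fun line => pyCharNeg line i), y = pyCharNeg l i := by
          have := (setlen1 (pyCharNeg l i) (ls.map (fun line => pyCharNeg line i))).mp
          simp only [List.map_cons] at hset
          exact this hset
        have hchar : ∀ s ∈ l :: ls, pyCharNeg s i = pyCharNeg l i := by
          intro s hs
          rcases List.mem_cons.mp hs with rfl | hs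
          · rfl
          · exact hall _ (List.mem_map.mpr ⟨s, hs, rfl⟩)
        have hheadD : ((l :: ls).map (fun line => pyCharNeg line i)).headD ' ' = pyCharNeg l i := by
          simp
        rw [hheadD]
        apply ihk (i + 1) (acc ++ [pyCharNeg l i]) (by omega) (by simp; omega)
        intro r hr
        obtain ⟨s, hs, rfl⟩ := List.mem_map.mp hr
        have hlen : acc.length < s.toList.reverse.length := by
          have := hmin_le _ hr
          omega
        have hgd : s.toList.reverse.getD acc.length ' ' = pyCharNeg l i := by
          have : pyCharNeg s i = s.toList.reverse.getD acc.length ' ' := by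
            unfold pyCharNeg
            congr 1
            omega
          rw [← this]
          exact hchar s hs
        rw [← hgd]
        exact prefix_snoc_getD (hpre _ hr) hlen
      · rw [loopA_step_neg _ _ _ _ hle hset]
        refine ⟨hpre, ?_⟩
        intro q hq
        have hlmem : l.toList.reverse ∈ (l :: ls).map (fun s => s.toList.reverse) := by simp
        rcases List.prefix_or_prefix_of_prefix (hq _ hlmem) (hpre _ hlmem) with h | h
        · exact h
        · obtain ⟨t, rfl⟩ := h
          cases t with
          | nil => simp
          | cons b u =>
            exfalso
            apply hset
            have hql : acc.length < (acc ++ b :: u).length := by simp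
            have hchar : ∀ s ∈ l :: ls, pyCharNeg s i = (acc ++ b :: u).getD acc.length ' ' := by
              intro s hs
              have hrm : s.toList.reverse ∈ (l :: ls).map (fun s => s.toList.reverse) :=
                List.mem_map.mpr ⟨s, hs, rfl⟩
              have := prefix_getD_eq (hq _ hrm) acc.length hql
              unfold pyCharNeg
              rw [← this]
              congr 1
              omega
            simp only [List.map_cons]
            apply (setlen1 _ _).mpr
            intro y hy
            obtain ⟨s, hs, rfl⟩ := List.mem_map.mp hy
            rw [hchar s (by simp [hs]), hchar l (by simp)]
    · rw [loopA_done _ _ _ _ hle]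
      refine ⟨hpre, ?_⟩
      intro q hq
      obtain ⟨r0, hr0mem, hr0len⟩ := hmin_mem
      have hql : q.length ≤ min_len := by
        have := (hq r0 hr0mem).length_le
        omega
      rcases List.prefix_or_prefix_of_prefix (hq r0 hr0mem) (hpre r0 hr0mem) with h | h
      · exact h
      · have : acc = q := h.eq_of_length_le (by omega)
        rw [← this]

theorem find_common_suffix_pattern_py_spec : Claim_equal_find_common_suffix_pattern_py := by
  intro sample_lines _hdom
  unfold Spec_find_common_suffix_pattern_py
  match sample_lines with
  | [] => rfl
  | [x] => rfl
  | l :: l2 :: rest =>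
    have hnlt : ¬ (l :: l2 :: rest).length < 2 := by simp
    simp only [find_common_suffix_pattern_py, find_common_suffix_pattern_py_alt, if_neg hnlt]
    set min_len := (((l :: l2 :: rest).map (fun line => line.toList.length)).min?).getD 0 with hml
    have hsome : ((l :: l2 :: rest).map (fun line => line.toList.length)).min? = some min_len := by
      cases hm : ((l :: l2 :: rest).map (fun line => line.toList.length)).min? with
      | none => simp at hm
      | some m => rw [hml, hm]; rfl
    have hiff := List.min?_eq_some_iff.mp hsome
    have hmin_le : ∀ r ∈ (l :: l2 :: rest).map (fun s => s.toList.reverse), min_len ≤ r.length := by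
      intro r hr
      obtain ⟨s, hs, rfl⟩ := List.mem_map.mp hr
      simp only [List.length_reverse]
      exact hiff.2 _ (List.mem_map.mpr ⟨s, hs, rfl⟩)
    have hmin_mem : ∃ r ∈ (l :: l2 :: rest).map (fun s => s.toList.reverse), r.length = min_len := by
      obtain ⟨s, hs, hlen⟩ := List.mem_map.mp hiff.1
      exact ⟨s.toList.reverse, List.mem_map.mpr ⟨s, hs, rfl⟩, by simp [hlen]⟩
    have hA := loopA_isLCP l (l2 :: rest) min_len hmin_le hmin_mem
      (min_len + 1 - 1) 1 [] rfl (by simp) (by intro r _; exact List.nil_prefix)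
    have hB := isLCP_foldl ((l2 :: rest).map (fun s => s.toList.reverse)) l.toList.reverse
    have hfold : (l2 :: rest).foldl (fun c line => lcp2 c line.toList.reverse) l.toList.reverse =
        ((l2 :: rest).map (fun s => s.toList.reverse)).foldl lcp2 l.toList.reverse := by
      rw [List.foldl_map]
    have hfam : (l.toList.reverse :: (l2 :: rest).map (fun s => s.toList.reverse)) =
        ((l :: l2 :: rest).map (fun s => s.toList.reverse)) := by simp
    rw [hfam] at hB
    have heq : loopA (l :: l2 :: rest) min_len 1 [] =
        (l2 :: rest).foldl (fun c line => lcp2 c line.toList.reverse) l.toList.reverse := by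
      rw [hfold]
      exact isLCP_unique hA hB
    rw [heq]
    cases hc : (l2 :: rest).foldl (fun c line => lcp2 c line.toList.reverse) l.toList.reverse with
    | nil => simp
    | cons a t => simp
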